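-- pv_equiv track=rewrite | github.com/wjq2019ustc/graduation-scheme | request_interaction.py | queue_sort
-- ===== SOURCE A (Python) =====
-- request_times_restrict = 4
--
-- def queue_sort(queue: list):
--     queue.sort(key=lambda s: s["key requirement"], reverse=True)    # from big to small and is stable
--     queue.sort(key=lambda s: s["delay"])
--     queue_up_times: list = []
--     queue_down_times: list = []
--     for item in queue:
--         temp = item["request times"]
--         if temp < request_times_restrict:
--             queue_down_times.append(item)
--         else:
--             queue_up_times.append(item)
--     queue_up_times.sort(key=lambda s: s["request times"], reverse=True)     # 没超过阈值，不需要按照路由次数排序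
--     if len(queue_up_times) > 0 and len(queue_down_times) > 0:
--         queue_up_times.extend(queue_down_times)
--         sorted_queue = queue_up_times
--     elif len(queue_down_times) > 0:
--         sorted_queue = queue_down_times
--     else:
--         sorted_queue = queue_up_times
--     return sorted_queue
-- ===== SOURCE B (Python) =====
-- request_times_restrict = 4
--
-- def queue_sort(queue: list):
--     queue.sort(key=lambda s: s["key requirement"], reverse=True)    # same two in-place sorts as A,
--     queue.sort(key=lambda s: s["delay"])                            # so the argument is mutated identically
--     # one stable composite-key sort replaces A's partition loop, group re-sort and branch chain
--     return sorted(queue, key=lambda s: (0, -s["request times"])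
--                   if s["request times"] >= request_times_restrict else (1, 0))
-- ===== Notes on version B (the rewrite author's own statement) =====
-- stated objective: simpler
-- what changed: A's explicit partition loop, separate descending re-sort of the above-threshold group and the if/elif/else recombination are replaced by a single stable sort with a composite key ((0,-request_times) above threshold, (1,0) below) over the same baseline ordering.
import Mathlib
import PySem

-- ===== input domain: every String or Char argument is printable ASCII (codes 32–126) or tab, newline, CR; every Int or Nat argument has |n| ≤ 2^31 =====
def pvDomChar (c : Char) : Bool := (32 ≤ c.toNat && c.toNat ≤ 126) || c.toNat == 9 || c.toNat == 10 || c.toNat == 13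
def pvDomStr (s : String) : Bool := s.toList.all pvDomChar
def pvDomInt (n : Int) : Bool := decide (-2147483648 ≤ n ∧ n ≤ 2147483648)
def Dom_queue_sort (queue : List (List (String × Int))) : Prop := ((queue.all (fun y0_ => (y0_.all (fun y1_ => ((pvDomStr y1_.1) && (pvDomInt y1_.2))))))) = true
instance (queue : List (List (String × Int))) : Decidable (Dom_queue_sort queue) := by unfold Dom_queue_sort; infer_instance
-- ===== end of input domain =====

-- B replaces A's partition loop + group re-sort + if/elif/else by ONE stable composite-key sort
-- over the same baseline ordering (objective: simpler). Both programs perform the same two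
-- in-place sorts of the argument; the equivalence proved here is about the RETURN value.

-- shared dict primitive: s["k"] (first match; 0 never used inside Pre_, where the key exists)
def pvGetKey (s : List (String × Int)) (k : String) : Int := (List.lookup k s).getD 0

-- ===== PORT A =====
def queue_sort (queue : List (List (String × Int))) : List (List (String × Int)) :=
  let q1 := PySem.List.sorted queue (fun s => pvGetKey s "key requirement") true
  let q2 := PySem.List.sorted q1 (fun s => pvGetKey s "delay") false
  let dnup := q2.foldl (fun (acc : List (List (String × Int)) × List (List (String × Int))) item =>
      if pvGetKey item "request times" < 4 then (acc.1 ++ [item], acc.2)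
      else (acc.1, acc.2 ++ [item])) ([], [])
  let queue_down_times := dnup.1
  let queue_up_times := PySem.List.sorted dnup.2 (fun s => pvGetKey s "request times") true
  if queue_up_times.length > 0 ∧ queue_down_times.length > 0 then queue_up_times ++ queue_down_times
  else if queue_down_times.length > 0 then queue_down_times
  else queue_up_times

-- ===== PORT B =====
def queue_sort_alt (queue : List (List (String × Int))) : List (List (String × Int)) :=
  let q1 := PySem.List.sorted queue (fun s => pvGetKey s "key requirement") true
  let q2 := PySem.List.sorted q1 (fun s => pvGetKey s "delay") false
  PySem.List.sorted q2 (fun s =>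
    toLex (if pvGetKey s "request times" ≥ 4 then ((0 : Int), -pvGetKey s "request times")
           else ((1 : Int), (0 : Int)))) false

-- ===== PRECONDITION & SPEC =====
-- Pre_: exactly the inputs where Python A returns (no KeyError): every item carries all three keys.
def Pre_queue_sort (queue : List (List (String × Int))) : Prop :=
  ∀ s ∈ queue,  -- each "key" the Python subscripts must be present in every item
    (List.lookup "key requirement" s).isSome ∧ (List.lookup "delay" s).isSome ∧
    (List.lookup "request times" s).isSome
instance (queue : List (List (String × Int))) : Decidable (Pre_queue_sort queue) := by
  unfold Pre_queue_sort; infer_instance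
def pvWitness_queue_sort : (List (List (String × Int))) :=
  [[("key requirement", 1), ("delay", 2), ("request times", 5)],
   [("key requirement", 0), ("delay", 1), ("request times", 2)]]
def Spec_queue_sort (queue : List (List (String × Int))) (out : List (List (String × Int))) : Prop := out = queue_sort_alt queue
instance (queue : List (List (String × Int))) (out : List (List (String × Int))) : Decidable (Spec_queue_sort queue out) := by unfold Spec_queue_sort; infer_instance

-- ===== CLAIM (what is proved, stated in full; the proofs are below) =====
def Claim_equal_queue_sort : Prop := ∀ (queue : List (List (String × Int))), Dom_queue_sort queue → Pre_queue_sort queue → Spec_queue_sort queue (queue_sort queue)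

-- ===== LEMMAS AND PROOFS =====

-- abbreviations used only by the proofs
def pvRT (s : List (String × Int)) : Int := pvGetKey s "request times"
def pvKeyB (s : List (String × Int)) : Lex (Int × Int) :=
  toLex (if pvRT s ≥ 4 then ((0 : Int), -pvRT s) else ((1 : Int), (0 : Int)))
def pvBB (a b : List (String × Int)) : Bool := decide (pvKeyB a < pvKeyB b)
def pvBU (a b : List (String × Int)) : Bool := decide (pvRT b < pvRT a)

lemma sorted_eq_foldl {α κ : Type} [LT κ] [DecidableLT κ] (xs : List α) (key : α → κ) :
    PySem.List.sorted xs key false =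
      xs.foldl (fun acc x => PySem.List.insertBy (fun a b => decide (key a < key b)) x acc) [] := rfl

lemma sorted_rev_eq_foldl {α κ : Type} [LT κ] [DecidableLT κ] (xs : List α) (key : α → κ) :
    PySem.List.sorted xs key true =
      xs.foldl (fun acc x => PySem.List.insertBy (fun a b => decide (key b < key a)) x acc) [] := rfl

lemma insertBy_nil {α : Type} (b : α → α → Bool) (x : α) :
    PySem.List.insertBy b x [] = [x] := rfl

lemma insertBy_cons {α : Type} (b : α → α → Bool) (x y : α) (ys : List α) :
    PySem.List.insertBy b x (y :: ys) =
      if b x y then x :: y :: ys else y :: PySem.List.insertBy b x ys := rfl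

-- comparisons of the composite key, by threshold class
lemma bb_eq_bu {x y : List (String × Int)} (hx : ¬ pvRT x < 4) (hy : ¬ pvRT y < 4) :
    pvBB x y = pvBU x y := by
  unfold pvBB pvBU pvKeyB
  rw [if_pos (by omega), if_pos (by omega)]
  simp [Prod.Lex.toLex_lt_toLex]

lemma bb_true_up_dn {x y : List (String × Int)} (hx : ¬ pvRT x < 4) (hy : pvRT y < 4) :
    pvBB x y = true := by
  unfold pvBB pvKeyB
  rw [if_pos (by omega), if_neg (by omega)]
  simp [Prod.Lex.toLex_lt_toLex]

lemma bb_false_dn {x y : List (String × Int)} (hx : pvRT x < 4) :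
    pvBB x y = false := by
  unfold pvBB pvKeyB
  rw [if_neg (by omega)]
  by_cases hy : pvRT y < 4
  · rw [if_neg (by omega)]; simp
  · rw [if_pos (by omega)]; simp [Prod.Lex.toLex_lt_toLex]

lemma insertBy_end {α : Type} (b : α → α → Bool) (x : α) (l : List α)
    (h : ∀ y ∈ l, b x y = false) : PySem.List.insertBy b x l = l ++ [x] := by
  induction l with
  | nil => rfl
  | cons y ys ih =>
      rw [insertBy_cons, if_neg (by simp [h y (by simp)]), ih (fun z hz => h z (by simp [hz]))]
      rfl

lemma insertBy_split {α : Type} (b b' : α → α → Bool) (x : α) (U D : List α)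
    (hU : ∀ y ∈ U, b x y = b' x y) (hD : ∀ y ∈ D, b x y = true) :
    PySem.List.insertBy b x (U ++ D) = PySem.List.insertBy b' x U ++ D := by
  induction U with
  | nil =>
      cases D with
      | nil => rfl
      | cons d ds => simp [insertBy_nil, insertBy_cons, hD d (by simp)]
  | cons u us ih =>
      have hu := hU u (by simp)
      rw [List.cons_append, insertBy_cons, insertBy_cons, ← hu]
      by_cases hb : b x u = true
      · simp [hb]
      · have hb' : b x u = false := by simpa using hb
        simp only [hb', Bool.false_eq_true, if_false, List.cons_append]
        rw [ih (fun z hz => hU z (by simp [hz]))]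

-- the partition loop produces the two filters of the traversed list
lemma partition_foldl (xs : List (List (String × Int)))
    (dn up : List (List (String × Int))) :
    xs.foldl (fun (acc : List (List (String × Int)) × List (List (String × Int))) item =>
      if pvGetKey item "request times" < 4 then (acc.1 ++ [item], acc.2)
      else (acc.1, acc.2 ++ [item])) (dn, up) =
    (dn ++ xs.filter (fun s => decide (pvRT s < 4)), up ++ xs.filter (fun s => !decide (pvRT s < 4))) := by
  induction xs generalizing dn up with
  | nil => simp
  | cons x xs ih =>
      rw [List.foldl_cons]
      by_cases h : pvRT x < 4
      · rw [if_pos (by simpa [pvRT] using h), ih]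
        simp [h]
      · rw [if_neg (by simpa [pvRT] using h), ih]
        simp [h]

-- core: one stable composite-key sort = (descending sort of the up-filter) ++ down-filter
lemma sorted_keyB_split (xs : List (List (String × Int))) :
    PySem.List.sorted xs pvKeyB false =
      PySem.List.sorted (xs.filter (fun s => !decide (pvRT s < 4))) pvRT true ++
        xs.filter (fun s => decide (pvRT s < 4)) := by
  induction xs using List.reverseRecOn with
  | nil => rfl
  | append_singleton xs x ih =>
      have hL : PySem.List.sorted (xs ++ [x]) pvKeyB false =
          PySem.List.insertBy pvBB x (PySem.List.sorted xs pvKeyB false) := by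
        rw [sorted_eq_foldl, sorted_eq_foldl, List.foldl_append]
        rfl
      by_cases hx : pvRT x < 4
      · -- below threshold: appended at the very end
        have hfU : (xs ++ [x]).filter (fun s => !decide (pvRT s < 4)) =
            xs.filter (fun s => !decide (pvRT s < 4)) := by simp [List.filter_append, hx]
        have hfD : (xs ++ [x]).filter (fun s => decide (pvRT s < 4)) =
            xs.filter (fun s => decide (pvRT s < 4)) ++ [x] := by simp [List.filter_append, hx]
        rw [hL, ih, hfU, hfD, ← List.append_assoc]
        exact insertBy_end _ _ _ (fun y _ => bb_false_dn hx)
      · -- above threshold: inserted within the up group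
        have hfU : (xs ++ [x]).filter (fun s => !decide (pvRT s < 4)) =
            xs.filter (fun s => !decide (pvRT s < 4)) ++ [x] := by simp [List.filter_append, hx]
        have hfD : (xs ++ [x]).filter (fun s => decide (pvRT s < 4)) =
            xs.filter (fun s => decide (pvRT s < 4)) := by simp [List.filter_append, hx]
        have hR : PySem.List.sorted ((xs.filter (fun s => !decide (pvRT s < 4))) ++ [x]) pvRT true =
            PySem.List.insertBy pvBU x
              (PySem.List.sorted (xs.filter (fun s => !decide (pvRT s < 4))) pvRT true) := by
          rw [sorted_rev_eq_foldl, sorted_rev_eq_foldl, List.foldl_append]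
          rfl
        rw [hL, ih, hfU, hfD, hR]
        apply insertBy_split
        · intro y hy
          have hyP : ¬ pvRT y < 4 := by
            have h1 := (PySem.List.mem_sorted _ _ _ _).mp hy
            have h2 := List.of_mem_filter h1
            simpa using h2
          exact bb_eq_bu hx hyP
        · intro y hy
          have hyP : pvRT y < 4 := by
            have := List.of_mem_filter hy; simpa using this
          exact bb_true_up_dn hx hyP

-- A's partition + group re-sort + branch chain equals B's single composite-key sort (any list)
lemma pv_core (l : List (List (String × Int))) :
    (let dnup := l.foldl (fun (acc : List (List (String × Int)) × List (List (String × Int))) item =>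
        if pvGetKey item "request times" < 4 then (acc.1 ++ [item], acc.2)
        else (acc.1, acc.2 ++ [item])) ([], [])
     let queue_down_times := dnup.1
     let queue_up_times := PySem.List.sorted dnup.2 (fun s => pvGetKey s "request times") true
     if queue_up_times.length > 0 ∧ queue_down_times.length > 0 then queue_up_times ++ queue_down_times
     else if queue_down_times.length > 0 then queue_down_times
     else queue_up_times) =
    PySem.List.sorted l (fun s =>
      toLex (if pvGetKey s "request times" ≥ 4 then ((0 : Int), -pvGetKey s "request times")
             else ((1 : Int), (0 : Int)))) false := by
  have hkey : (fun s : List (String × Int) =>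
      toLex (if pvGetKey s "request times" ≥ 4 then ((0 : Int), -pvGetKey s "request times")
             else ((1 : Int), (0 : Int)))) = pvKeyB := by
    funext s; simp [pvKeyB, pvRT]
  have hpart := partition_foldl l [] []
  simp only [List.nil_append] at hpart
  simp only [hpart, hkey, sorted_keyB_split]
  have hrt : (fun s : List (String × Int) => pvGetKey s "request times") = pvRT := rfl
  rw [hrt]
  set U := PySem.List.sorted (l.filter (fun s => !decide (pvRT s < 4))) pvRT true with hU
  set D := l.filter (fun s => decide (pvRT s < 4)) with hD
  by_cases h1 : U.length > 0 ∧ D.length > 0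
  · simp [h1]
  · rw [not_and_or] at h1
    by_cases h2 : D.length > 0
    · have hUe : U = [] := by
        rcases h1 with h1 | h1
        · exact List.length_eq_zero_iff.mp (by omega)
        · omega
      simp [hUe, h2]
    · have hDe : D = [] := List.length_eq_zero_iff.mp (by omega)
      simp [hDe]

-- ===== VERDICT (by name: the statement is the Claim_ definition above) =====
theorem queue_sort_spec : Claim_equal_queue_sort := by
  intro queue _ _
  unfold Spec_queue_sort queue_sort queue_sort_alt
  exact pv_core _
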